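-- pv_equiv track=rewrite | github.com/RupinderKaur10/Data-Stuctures-and-Algorithms | accenture/6.py | LargeSmallSum
-- ===== SOURCE A (Python) =====
-- def LargeSmallSum(arr):
--     arr.sort()
--     even = []
--     odd = []
--     for i in range(len(arr)):
--         if i%2!=0:
--             even.append(arr[i])
--         else:
--             odd.append(arr[i])
--     return even[len(even)-2]+odd[1]
-- ===== SOURCE B (Python) =====
-- def _ins_asc(lst, x):
--     if not lst or x <= lst[0]:
--         return [x] + lst
--     return [lst[0]] + _ins_asc(lst[1:], x)
--
-- def _ins_desc(lst, x):
--     if not lst or x >= lst[0]: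
--         return [x] + lst
--     return [lst[0]] + _ins_desc(lst[1:], x)
--
-- def LargeSmallSum(arr):
--     # one pass keeping only the 3 smallest and the m largest elements
--     m = 3 if len(arr) % 2 == 0 else 4
--     small = []
--     big = []
--     for x in arr:
--         small = _ins_asc(small, x)[:3]
--         big = _ins_desc(big, x)[:m]
--     return small[2] + big[m - 1]
-- ===== Notes on version B (the rewrite author's own statement) =====
-- stated objective: alternative
-- what changed: B replaces A's full sort plus parity-split lists by a single pass that maintains only the 3 smallest and the m largest elements (m = 3 for even length, 4 for odd) via bounded ordered insertion, returning 3rd-smallest + m-th-largest.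
-- outside the precondition, e.g. on LargeSmallSum([1, 2, 3]): A returns 5, B raises IndexError; on LargeSmallSum([-1]): A raises IndexError, B raises IndexError
import Mathlib
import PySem

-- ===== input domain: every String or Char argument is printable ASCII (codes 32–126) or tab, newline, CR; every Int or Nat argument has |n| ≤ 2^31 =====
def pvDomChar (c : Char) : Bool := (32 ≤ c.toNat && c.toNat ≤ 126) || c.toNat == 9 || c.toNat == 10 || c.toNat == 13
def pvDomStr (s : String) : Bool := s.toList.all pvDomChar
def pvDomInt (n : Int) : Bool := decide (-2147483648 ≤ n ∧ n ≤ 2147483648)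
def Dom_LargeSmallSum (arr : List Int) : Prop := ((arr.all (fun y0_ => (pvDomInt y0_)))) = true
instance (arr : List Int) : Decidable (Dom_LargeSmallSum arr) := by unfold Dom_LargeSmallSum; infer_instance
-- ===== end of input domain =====

-- B keeps only the 3 smallest and the m largest elements in one pass instead of sorting and
-- splitting by index parity (objective: alternative). A sorts its argument in place; the
-- equivalence proved here is about the RETURN value only (B does not mutate its argument).

-- ===== PORT A =====
def LargeSmallSum (arr : List Int) : Int :=
  let s := PySem.List.sorted arr (fun x => x) false
  let st := (PySem.List.pyRange 0 (s.length : Int) 1).foldl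
    (fun (st : List Int × List Int) i =>
      if PySem.Int.mod i 2 ≠ 0 then (st.1 ++ [PySem.List.pyGetD s i 0], st.2)
      else (st.1, st.2 ++ [PySem.List.pyGetD s i 0]))
    ([], [])
  PySem.List.pyGetD st.1 ((st.1.length : Int) - 2) 0 + PySem.List.pyGetD st.2 1 0

-- ===== PORT B =====
def insAsc (lst : List Int) (x : Int) : List Int :=
  match lst with
  | [] => [x]
  | h :: t => if x ≤ h then x :: h :: t else h :: insAsc t x

def insDesc (lst : List Int) (x : Int) : List Int :=
  match lst with
  | [] => [x]
  | h :: t => if h ≤ x then x :: h :: t else h :: insDesc t x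

def LargeSmallSum_alt (arr : List Int) : Int :=
  let m : Nat := if arr.length % 2 = 0 then 3 else 4
  let st := arr.foldl
    (fun (st : List Int × List Int) x => ((insAsc st.1 x).take 3, (insDesc st.2 x).take m))
    ([], [])
  PySem.List.pyGetD st.1 2 0 + PySem.List.pyGetD st.2 ((m : Int) - 1) 0

-- ===== PRECONDITION & SPEC =====
-- Pre_ excludes lists of length < 3, on which A raises IndexError, and length-3 lists, where
-- A's value comes from accidental negative-index wraparound (even[len(even)-2] = even[-1])
-- and B's natural bounded selection itself raises IndexError.
def Pre_LargeSmallSum (arr : List Int) : Prop := 4 ≤ arr.length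
instance (arr : List Int) : Decidable (Pre_LargeSmallSum arr) := by unfold Pre_LargeSmallSum; infer_instance
def pvWitness_LargeSmallSum : List Int := [3, 1, 4, 1, 5]
def Spec_LargeSmallSum (arr : List Int) (out : Int) : Prop := out = LargeSmallSum_alt arr
instance (arr : List Int) (out : Int) : Decidable (Spec_LargeSmallSum arr out) := by unfold Spec_LargeSmallSum; infer_instance

-- ===== CLAIM (what is proved, stated in full; the proofs are below) =====
def Claim_equal_LargeSmallSum : Prop := ∀ (arr : List Int), Dom_LargeSmallSum arr → Pre_LargeSmallSum arr → Spec_LargeSmallSum arr (LargeSmallSum arr)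

-- ===== LEMMAS AND PROOFS =====

theorem take_insAsc (x : Int) : ∀ (l : List Int) (k : Nat),
    (insAsc (l.take k) x).take k = (insAsc l x).take k := by
  intro l
  induction l with
  | nil => intro k; simp
  | cons h t ih =>
    intro k
    cases k with
    | zero => simp
    | succ k' =>
      simp only [List.take_succ_cons, insAsc]
      by_cases hx : x ≤ h
      · simp only [if_pos hx, List.take_succ_cons]
        cases k' with
        | zero => simp
        | succ j => simp [List.take_take]
      · simp only [if_neg hx, List.take_succ_cons, ih]

theorem take_insDesc (x : Int) : ∀ (l : List Int) (k : Nat),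
    (insDesc (l.take k) x).take k = (insDesc l x).take k := by
  intro l
  induction l with
  | nil => intro k; simp
  | cons h t ih =>
    intro k
    cases k with
    | zero => simp
    | succ k' =>
      simp only [List.take_succ_cons, insDesc]
      by_cases hx : h ≤ x
      · simp only [if_pos hx, List.take_succ_cons]
        cases k' with
        | zero => simp
        | succ j => simp [List.take_take]
      · simp only [if_neg hx, List.take_succ_cons, ih]

theorem foldB (m : Nat) : ∀ (l a b : List Int),
    l.foldl (fun (st : List Int × List Int) x =>
        ((insAsc st.1 x).take 3, (insDesc st.2 x).take m)) (a.take 3, b.take m)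
      = ((l.foldl insAsc a).take 3, (l.foldl insDesc b).take m) := by
  intro l
  induction l with
  | nil => intro a b; simp
  | cons x t ih =>
    intro a b
    simp only [List.foldl_cons]
    rw [take_insAsc, take_insDesc]
    exact ih (insAsc a x) (insDesc b x)

theorem insAsc_eq (x : Int) (l : List Int) :
    insAsc l x = List.orderedInsert (· ≤ ·) x l := by
  induction l with
  | nil => rfl
  | cons h t ih => simp [insAsc, List.orderedInsert, ih]

theorem insDesc_eq (x : Int) (l : List Int) :
    insDesc l x = List.orderedInsert (fun a b => b ≤ a) x l := by
  induction l with
  | nil => rfl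
  | cons h t ih => simp [insDesc, List.orderedInsert, ih]

theorem foldl_insAsc_perm : ∀ (l a : List Int), (l.foldl insAsc a).Perm (a ++ l) := by
  intro l
  induction l with
  | nil => intro a; simp
  | cons x t ih =>
    intro a
    simp only [List.foldl_cons]
    refine (ih (insAsc a x)).trans ?_
    have h1 : (insAsc a x).Perm (x :: a) := by
      rw [insAsc_eq]; exact List.perm_orderedInsert _ _ _
    exact ((h1.append_right t).trans (List.perm_middle.symm))

theorem foldl_insDesc_perm : ∀ (l a : List Int), (l.foldl insDesc a).Perm (a ++ l) := by
  intro l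
  induction l with
  | nil => intro a; simp
  | cons x t ih =>
    intro a
    simp only [List.foldl_cons]
    refine (ih (insDesc a x)).trans ?_
    have h1 : (insDesc a x).Perm (x :: a) := by
      rw [insDesc_eq]; exact List.perm_orderedInsert _ _ _
    exact ((h1.append_right t).trans (List.perm_middle.symm))

theorem foldl_insAsc_sorted : ∀ (l a : List Int),
    a.Pairwise (· ≤ ·) → (l.foldl insAsc a).Pairwise (· ≤ ·) := by
  intro l
  induction l with
  | nil => intro a h; simpa using h
  | cons x t ih =>
    intro a h
    simp only [List.foldl_cons]
    exact ih _ (by rw [insAsc_eq]; exact List.Pairwise.orderedInsert x a h)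

theorem foldl_insDesc_sorted : ∀ (l a : List Int),
    a.Pairwise (fun p q => q ≤ p) → (l.foldl insDesc a).Pairwise (fun p q => q ≤ p) := by
  haveI : Std.Total (fun p q : Int => q ≤ p) := ⟨fun p q => (le_total q p)⟩
  haveI : IsTrans Int (fun p q : Int => q ≤ p) := ⟨fun p q r h1 h2 => le_trans h2 h1⟩
  intro l
  induction l with
  | nil => intro a h; simpa using h
  | cons x t ih =>
    intro a h
    simp only [List.foldl_cons]
    exact ih _ (by rw [insDesc_eq]; exact List.Pairwise.orderedInsert x a h)

theorem loopA (s : List Int) : ∀ (n : Nat),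
    (PySem.List.pyRange 0 (n : Int) 1).foldl
      (fun (st : List Int × List Int) i =>
        if PySem.Int.mod i 2 ≠ 0 then (st.1 ++ [PySem.List.pyGetD s i 0], st.2)
        else (st.1, st.2 ++ [PySem.List.pyGetD s i 0]))
      ([], [])
    = ((List.range (n / 2)).map (fun k => s.getD (2 * k + 1) 0),
       (List.range ((n + 1) / 2)).map (fun k => s.getD (2 * k) 0)) := by
  intro n
  induction n with
  | zero => simp [PySem.List.pyRange_one_eq_nil]
  | succ n ih =>
    have hc : ((n + 1 : Nat) : Int) = (n : Int) + 1 := by push_cast; ring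
    rw [hc, PySem.List.pyRange_one_succ_right (by positivity), List.foldl_append, ih]
    simp only [List.foldl_cons, List.foldl_nil]
    have hmod : PySem.Int.mod (n : Int) 2 = (n : Int) % 2 :=
      PySem.Int.mod_eq_emod_of_pos (by norm_num)
    have hget : PySem.List.pyGetD s (n : Int) 0 = s.getD n 0 := PySem.List.pyGetD_natCast s n 0
    by_cases hn : n % 2 = 0
    · have hcond : ¬ (PySem.Int.mod (n : Int) 2 ≠ 0) := by
        rw [hmod]; omega
      rw [if_neg hcond]
      have e1 : (n + 1) / 2 = n / 2 := by omega
      have e2 : (n + 1 + 1) / 2 = (n + 1) / 2 + 1 := by omega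
      have e3 : 2 * (n / 2) = n := by omega
      simp only [e1, e2, List.range_succ, List.map_append, List.map_cons, List.map_nil, hget, e3]
    · have hcond : PySem.Int.mod (n : Int) 2 ≠ 0 := by
        rw [hmod]; omega
      rw [if_pos hcond]
      have e1 : (n + 1) / 2 = n / 2 + 1 := by omega
      have e2 : (n + 1 + 1) / 2 = (n + 1) / 2 := by omega
      have e3 : 2 * (n / 2) + 1 = n := by omega
      simp only [e1, e2, List.range_succ, List.map_append, List.map_cons, List.map_nil, hget, e3]

theorem getD_map_range' (f : Nat → Int) (M k : Nat) (hk : k < M) :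
    ((List.range M).map f).getD k 0 = f k := by
  simp [List.getD, hk]


theorem foldB0 (m : Nat) (l : List Int) :
    l.foldl (fun (st : List Int × List Int) x =>
        ((insAsc st.1 x).take 3, (insDesc st.2 x).take m)) ([], [])
      = ((l.foldl insAsc []).take 3, (l.foldl insDesc []).take m) := by
  have h := foldB m l [] []
  simpa using h

theorem getD_take0 (l : List Int) (n k : Nat) (h : k < n) :
    (l.take n).getD k 0 = l.getD k 0 := by
  simp [List.getD_eq_getElem?_getD, h]

theorem getD_reverse0 (l : List Int) (k : Nat) (h : k < l.length) :
    l.reverse.getD k 0 = l.getD (l.length - 1 - k) 0 := by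
  rw [List.getD_eq_getElem?_getD, List.getD_eq_getElem?_getD, List.getElem?_reverse h]

-- ===== VERDICT (by name: the statement is the Claim_ definition above) =====
theorem LargeSmallSum_spec : Claim_equal_LargeSmallSum := by
  intro arr _ hpre
  unfold Pre_LargeSmallSum at hpre
  unfold Spec_LargeSmallSum
  simp only [LargeSmallSum, LargeSmallSum_alt]
  set S := PySem.List.sorted arr (fun x => x) false with hSdef
  have hlen : S.length = arr.length := PySem.List.length_sorted arr _ _
  have hA : S = arr.foldl insAsc [] :=
    PySem.List.sorted_id_eq_of_perm_of_pairwise arr (arr.foldl insAsc [])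
      (by simpa using foldl_insAsc_perm arr [])
      (foldl_insAsc_sorted arr [] (by simp))
  have hD : arr.foldl insDesc [] = S.reverse := by
    refine List.eq_of_perm_of_sorted (le := fun p q => q ≤ p)
      (fun a b _ _ h1 h2 => le_antisymm h2 h1)
      (foldl_insDesc_sorted arr [] (by simp)) ?_ ?_
    · rw [List.pairwise_reverse]
      simpa using PySem.List.sorted_pairwise (xs := arr) (key := fun x => x)
    · refine ((by simpa using foldl_insDesc_perm arr [] :
        (List.foldl insDesc [] arr).Perm arr)).trans ?_
      exact (PySem.List.sorted_perm arr _ _).symm.trans (S.reverse_perm).symm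
  rw [loopA S S.length, foldB0, ← hA, hD]
  simp only [List.length_map, List.length_range]
  have h2 : PySem.List.pyGetD ((List.range ((S.length + 1) / 2)).map
      (fun k => S.getD (2 * k) 0)) 1 0
      = ((List.range ((S.length + 1) / 2)).map (fun k => S.getD (2 * k) 0)).getD 1 0 := by
    simpa using PySem.List.pyGetD_natCast
      ((List.range ((S.length + 1) / 2)).map (fun k => S.getD (2 * k) 0)) 1 0
  have h3 : PySem.List.pyGetD (S.take 3) 2 0 = (S.take 3).getD 2 0 := by
    simpa using PySem.List.pyGetD_natCast (S.take 3) 2 0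
  have hcast1 : ((S.length / 2 : Nat) : Int) - 2 = ((S.length / 2 - 2 : Nat) : Int) := by
    omega
  rw [h2, h3, hcast1, PySem.List.pyGetD_natCast]
  rw [getD_map_range' _ _ _ (by omega), getD_map_range' _ _ _ (by omega)]
  rw [getD_take0 S 3 2 (by omega)]
  by_cases hpar : arr.length % 2 = 0
  · simp only [if_pos hpar]
    have h4 : PySem.List.pyGetD (S.reverse.take 3) (((3 : Nat) : Int) - 1) 0
        = (S.reverse.take 3).getD 2 0 := by
      rw [show (((3 : Nat) : Int) - 1) = ((2 : Nat) : Int) from by norm_num]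
      exact PySem.List.pyGetD_natCast (S.reverse.take 3) 2 0
    rw [h4, getD_take0 _ 3 2 (by omega), getD_reverse0 _ 2 (by omega)]
    rw [show 2 * (S.length / 2 - 2) + 1 = S.length - 1 - 2 from by omega]
    rw [show 2 * 1 = 2 from rfl]
    exact Int.add_comm _ _
  · simp only [if_neg hpar]
    have h4 : PySem.List.pyGetD (S.reverse.take 4) (((4 : Nat) : Int) - 1) 0
        = (S.reverse.take 4).getD 3 0 := by
      rw [show (((4 : Nat) : Int) - 1) = ((3 : Nat) : Int) from by norm_num]
      exact PySem.List.pyGetD_natCast (S.reverse.take 4) 3 0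
    rw [h4, getD_take0 _ 4 3 (by omega), getD_reverse0 _ 3 (by omega)]
    rw [show 2 * (S.length / 2 - 2) + 1 = S.length - 1 - 3 from by omega]
    rw [show 2 * 1 = 2 from rfl]
    exact Int.add_comm _ _
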